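-- pv_equiv track=rewrite | github.com/piedro404/resolucoes-de-problemas | Uri/Strings/Atalhos Bloggo.py | tHTML
-- ===== SOURCE A (Python) =====
-- def Tag(t, p):
--     if p:
--         return f"<{t}>"
--
--     return f"</{t}>"
--
-- def tHTML(content):
--     result = ''
--     b = True
--     i = True
--     for x in content:
--         if x == "_":
--             result += Tag("i", i)
--             i = not(i)
--         elif x == "*":
--             result += Tag("b", b)
--             b = not(b)
--
--         else:
--             result += x
--
--     return result
-- ===== SOURCE B (Python) =====
-- def _toggle_join(s, delim, tag):
--     # Split on the delimiter; re-join the pieces with alternating open/close tags.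
--     parts = s.split(delim)
--     out = parts[0]
--     opening = True
--     for part in parts[1:]:
--         out += ("<" + tag + ">" if opening else "</" + tag + ">") + part
--         opening = not opening
--     return out
--
-- def tHTML(content):
--     return _toggle_join(_toggle_join(content, "_", "i"), "*", "b")
-- ===== Notes on version B (the rewrite author's own statement) =====
-- stated objective: faster
-- what changed: Replaces the single interleaved character loop with two booleans by two independent passes, each of which splits the string on one delimiter and re-joins the pieces with alternating open/close tags; bulk split/concatenation replaces per-character string appends.
import Mathlib
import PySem

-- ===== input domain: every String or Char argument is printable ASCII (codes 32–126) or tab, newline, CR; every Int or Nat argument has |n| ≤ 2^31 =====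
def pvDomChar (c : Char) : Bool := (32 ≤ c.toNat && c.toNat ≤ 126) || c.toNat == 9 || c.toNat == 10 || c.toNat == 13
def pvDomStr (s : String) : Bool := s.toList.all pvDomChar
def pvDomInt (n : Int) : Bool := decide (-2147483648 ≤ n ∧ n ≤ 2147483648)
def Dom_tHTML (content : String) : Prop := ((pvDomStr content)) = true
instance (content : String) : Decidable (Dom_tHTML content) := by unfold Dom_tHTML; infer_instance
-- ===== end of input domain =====

-- B rewrites A's single interleaved toggle loop as two independent split/re-join passes (constant-factor faster in a timing run: bulk split/concat instead of per-char appends).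

-- ===== PORT A =====
-- f"<{t}>" / f"</{t}>" on the char-list representation
def pyTag (t : List Char) (p : Bool) : List Char :=
  if p then ['<'] ++ t ++ ['>'] else ['<', '/'] ++ t ++ ['>']

-- the for-loop of A: state (result, b, i)
def tHTMLgo : List Char → List Char → Bool → Bool → List Char
  | [], result, _, _ => result
  | x :: xs, result, b, i =>
    if x = '_' then tHTMLgo xs (result ++ pyTag ['i'] i) b (!i)
    else if x = '*' then tHTMLgo xs (result ++ pyTag ['b'] b) (!b) i
    else tHTMLgo xs (result ++ [x]) b i

def tHTML (content : String) : String :=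
  String.ofList (tHTMLgo content.toList [] true true)

-- ===== PORT B =====
-- the for-loop of _toggle_join: over parts[1:], state (out, opening)
def tjGo (tag : List Char) : List (List Char) → List Char → Bool → List Char
  | [], out, _ => out
  | part :: ps, out, opening =>
    tjGo tag ps (out ++ (if opening then ['<'] ++ tag ++ ['>'] else ['<', '/'] ++ tag ++ ['>']) ++ part) (!opening)

def toggleJoin (s : List Char) (delim : Char) (tag : List Char) : List Char :=
  let parts := PySem.Chars.splitOn s [delim]
  tjGo tag parts.tail (parts.headD []) true

def tHTML_alt (content : String) : String :=
  String.ofList (toggleJoin (toggleJoin content.toList '_' ['i']) '*' ['b'])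

-- ===== PRECONDITION & SPEC =====
def Spec_tHTML (content : String) (out : String) : Prop := out = tHTML_alt content
instance (content : String) (out : String) : Decidable (Spec_tHTML content out) := by unfold Spec_tHTML; infer_instance

-- ===== CLAIM (what is proved, stated in full; the proofs are below) =====
def Claim_equal_tHTML : Prop := ∀ (content : String), Dom_tHTML content → Spec_tHTML content (tHTML content)

-- ===== LEMMAS AND PROOFS =====

-- structural single-char split (the shape PySem.Chars.splitOn has for a one-char separator)
def split1 (d : Char) : List Char → List (List Char)
  | [] => [[]]
  | c :: cs => if c = d then [] :: split1 d cs else (split1 d cs).modifyHead (c :: ·)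

-- a single toggling pass, the common denominator of both programs
def passD (d : Char) (tag : List Char) : List Char → Bool → List Char
  | [], _ => []
  | c :: cs, op =>
    if c = d then (if op then ['<'] ++ tag ++ ['>'] else ['<', '/'] ++ tag ++ ['>']) ++ passD d tag cs (!op)
    else c :: passD d tag cs op

theorem split1_ne_nil (d : Char) : ∀ (l : List Char), split1 d l ≠ []
  | [] => by simp [split1]
  | c :: cs => by
    simp only [split1]
    split_ifs
    · simp
    · cases h : split1 d cs with
      | nil => exact absurd h (split1_ne_nil d cs)
      | cons p ps => simp [List.modifyHead]

theorem split1_exists (d : Char) (l : List Char) : ∃ p ps, split1 d l = p :: ps := by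
  cases h : split1 d l with
  | nil => exact absurd h (split1_ne_nil d l)
  | cons p ps => exact ⟨p, ps, rfl⟩

theorem splitOn_go_eq (d : Char) (l : List Char) : ∀ (fuel : Nat), l.length ≤ fuel →
    ∀ (cur : List Char) (acc : List (List Char)),
    PySem.Chars.splitOn.go [d] (fuel + 1) l cur acc
      = acc.reverse ++ (split1 d l).modifyHead (cur.reverse ++ ·) := by
  induction l with
  | nil =>
    intro fuel _ cur acc
    simp [PySem.Chars.splitOn.go, split1, List.modifyHead]
  | cons c cs ih =>
    intro fuel hf cur acc
    simp only [List.length_cons] at hf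
    obtain ⟨f, rfl⟩ : ∃ f, fuel = f + 1 := ⟨fuel - 1, by omega⟩
    by_cases hcd : c = d
    · subst hcd
      have hstep : PySem.Chars.splitOn.go [c] (f + 1 + 1) (c :: cs) cur acc
          = PySem.Chars.splitOn.go [c] (f + 1) cs [] (cur.reverse :: acc) := by
        simp [PySem.Chars.splitOn.go, List.isPrefixOf]
      rw [hstep, ih f (by omega) [] (cur.reverse :: acc)]
      obtain ⟨p, ps, hps⟩ := split1_exists c cs
      have hsp : split1 c (c :: cs) = [] :: split1 c cs := by simp [split1]
      rw [hsp, hps]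
      simp [List.modifyHead]
    · have hdc : (d == c) = false := beq_eq_false_iff_ne.mpr (Ne.symm hcd)
      have hstep : PySem.Chars.splitOn.go [d] (f + 1 + 1) (c :: cs) cur acc
          = PySem.Chars.splitOn.go [d] (f + 1) cs (c :: cur) acc := by
        simp [PySem.Chars.splitOn.go, List.isPrefixOf, hdc]
      rw [hstep, ih f (by omega) (c :: cur) acc]
      obtain ⟨p, ps, hps⟩ := split1_exists d cs
      have hsp : split1 d (c :: cs) = (split1 d cs).modifyHead (c :: ·) := by simp [split1, hcd]
      rw [hsp, hps]
      simp [List.modifyHead]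

theorem splitOn_eq_split1 (d : Char) (l : List Char) :
    PySem.Chars.splitOn l [d] = split1 d l := by
  have h := splitOn_go_eq d l l.length (le_refl _) [] []
  simp only [PySem.Chars.splitOn]
  rw [h]
  obtain ⟨p, ps, hps⟩ := split1_exists d l
  simp [hps, List.modifyHead]

theorem tjGo_split1 (d : Char) (tag : List Char) (l : List Char) :
    ∀ (op : Bool) (out : List Char),
    tjGo tag (split1 d l).tail (out ++ (split1 d l).headD []) op = out ++ passD d tag l op := by
  induction l with
  | nil => intro op out; simp [split1, tjGo, passD]
  | cons c cs ih =>
    intro op out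
    by_cases hcd : c = d
    · subst hcd
      obtain ⟨p, ps, hps⟩ := split1_exists c cs
      have hsp : split1 c (c :: cs) = [] :: split1 c cs := by simp [split1]
      have hpass : passD c tag (c :: cs) op
          = (if op then ['<'] ++ tag ++ ['>'] else ['<', '/'] ++ tag ++ ['>']) ++ passD c tag cs (!op) := by
        simp [passD]
      rw [hsp, hpass]
      simp only [List.tail_cons, List.headD_cons]
      have hgo : tjGo tag (split1 c cs) (out ++ []) op
          = tjGo tag (split1 c cs).tail
              ((out ++ (if op then ['<'] ++ tag ++ ['>'] else ['<', '/'] ++ tag ++ ['>']))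
                ++ (split1 c cs).headD []) (!op) := by
        rw [hps]
        simp [tjGo, List.append_assoc]
      rw [hgo, ih (!op) (out ++ (if op then ['<'] ++ tag ++ ['>'] else ['<', '/'] ++ tag ++ ['>']))]
      simp [List.append_assoc]
    · obtain ⟨p, ps, hps⟩ := split1_exists d cs
      have hsp : split1 d (c :: cs) = (split1 d cs).modifyHead (c :: ·) := by simp [split1, hcd]
      have hpass : passD d tag (c :: cs) op = c :: passD d tag cs op := by
        simp [passD, hcd]
      rw [hsp, hpass, hps]
      simp only [List.modifyHead, List.tail_cons, List.headD_cons]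
      have := ih op (out ++ [c])
      rw [hps] at this
      simp only [List.tail_cons, List.headD_cons] at this
      simpa [List.append_assoc] using this

-- the italic pass never emits '*', so the bold pass distributes over its output
theorem passB_tagI (i b : Bool) (rest : List Char) :
    passD '*' ['b'] ((if i then ['<'] ++ ['i'] ++ ['>'] else ['<', '/'] ++ ['i'] ++ ['>']) ++ rest) b
      = (if i then ['<'] ++ ['i'] ++ ['>'] else ['<', '/'] ++ ['i'] ++ ['>']) ++ passD '*' ['b'] rest b := by
  cases i <;> simp [passD]

theorem toggleJoin_eq_passD (d : Char) (tag : List Char) (l : List Char) :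
    toggleJoin l d tag = passD d tag l true := by
  have h := tjGo_split1 d tag l true []
  simpa [toggleJoin, splitOn_eq_split1] using h

theorem tHTMLgo_eq_passes (l : List Char) :
    ∀ (r : List Char) (b i : Bool),
    tHTMLgo l r b i = r ++ passD '*' ['b'] (passD '_' ['i'] l i) b := by
  induction l with
  | nil => intro r b i; simp [tHTMLgo, passD]
  | cons x xs ih =>
    intro r b i
    by_cases hu : x = '_'
    · subst hu
      have h1 : tHTMLgo ('_' :: xs) r b i = tHTMLgo xs (r ++ pyTag ['i'] i) b (!i) := by
        simp [tHTMLgo]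
      have h2 : passD '_' ['i'] ('_' :: xs) i
          = (if i then ['<'] ++ ['i'] ++ ['>'] else ['<', '/'] ++ ['i'] ++ ['>']) ++ passD '_' ['i'] xs (!i) := by
        simp [passD]
      rw [h1, ih, h2, passB_tagI]
      cases i <;> simp [pyTag, List.append_assoc]
    · by_cases hs : x = '*'
      · subst hs
        have h1 : tHTMLgo ('*' :: xs) r b i = tHTMLgo xs (r ++ pyTag ['b'] b) (!b) i := by
          simp [tHTMLgo]
        have h2 : passD '_' ['i'] ('*' :: xs) i = '*' :: passD '_' ['i'] xs i := by
          simp [passD]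
        have h3 : passD '*' ['b'] ('*' :: passD '_' ['i'] xs i) b
            = (if b then ['<'] ++ ['b'] ++ ['>'] else ['<', '/'] ++ ['b'] ++ ['>']) ++ passD '*' ['b'] (passD '_' ['i'] xs i) (!b) := by
          simp [passD]
        rw [h1, ih, h2, h3]
        cases b <;> simp [pyTag, List.append_assoc]
      · have h1 : tHTMLgo (x :: xs) r b i = tHTMLgo xs (r ++ [x]) b i := by
          simp [tHTMLgo, hu, hs]
        have h2 : passD '_' ['i'] (x :: xs) i = x :: passD '_' ['i'] xs i := by
          simp [passD, hu]
        have h3 : passD '*' ['b'] (x :: passD '_' ['i'] xs i) b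
            = x :: passD '*' ['b'] (passD '_' ['i'] xs i) b := by
          simp [passD, hs]
        rw [h1, ih, h2, h3]
        simp [List.append_assoc]

-- ===== VERDICT (by name: the statement is the Claim_ definition above) =====
theorem tHTML_spec : Claim_equal_tHTML := by
  intro content _
  unfold Spec_tHTML tHTML tHTML_alt
  rw [toggleJoin_eq_passD, toggleJoin_eq_passD, tHTMLgo_eq_passes]
  simp
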